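-- pv_equiv track=rewrite | github.com/hukimato/asum | asum/template/Interpreter.py | get_token_list
-- ===== SOURCE A (Python) =====
-- def get_token_list(splited_content):
--     splited_by_tokens = []
--     content_index = 0
--     while content_index < len(splited_content):
--         if '<#' not in splited_content[content_index]:
--             splited_by_tokens.append(splited_content[content_index])
--             content_index += 1
--         else:
--             token = splited_content[content_index]
--             while '#>' not in splited_content[content_index]:
--                 content_index += 1
--                 token += splited_content[content_index]
--             splited_by_tokens.append(token)
--             content_index += 1
--     return splited_by_tokens
-- ===== SOURCE B (Python) =====
-- def get_token_list(splited_content):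
--     result = []
--     buf = None
--     for part in splited_content:
--         if buf is None:
--             if '<#' not in part:
--                 result.append(part)
--             elif '#>' in part:
--                 result.append(part)
--             else:
--                 buf = part
--         else:
--             buf += part
--             if '#>' in part:
--                 result.append(buf)
--                 buf = None
--     return result
-- ===== Notes on version B (the rewrite author's own statement) =====
-- stated objective: idiomatic
-- what changed: Replaces A's index-based outer while with a nested inner while (token merging by repeated indexing) by a single index-free for-loop over the elements folding a (result, open-token buffer) state; Pre_ excludes the inputs on which A raises IndexError (an element opening a token with '<#' outside a token that no later element closes with '#>').
import Mathlib
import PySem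

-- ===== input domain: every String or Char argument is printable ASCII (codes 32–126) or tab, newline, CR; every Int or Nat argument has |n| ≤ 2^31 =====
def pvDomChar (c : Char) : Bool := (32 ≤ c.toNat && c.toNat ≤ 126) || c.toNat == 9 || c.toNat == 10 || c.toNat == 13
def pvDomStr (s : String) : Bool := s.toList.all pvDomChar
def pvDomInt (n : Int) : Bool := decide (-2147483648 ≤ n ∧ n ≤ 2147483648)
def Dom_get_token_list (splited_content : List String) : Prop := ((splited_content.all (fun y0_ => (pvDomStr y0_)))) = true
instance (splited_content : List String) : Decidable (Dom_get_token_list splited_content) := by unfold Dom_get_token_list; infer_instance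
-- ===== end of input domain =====

set_option maxRecDepth 8192


-- B replaces A's index-based outer/inner while loops by one index-free for-loop folding a
-- (result, open-token buffer) state; same output wherever A returns (Pre_ excludes the inputs
-- where A raises IndexError on an unterminated '<#' token).

-- '<#' in s  /  '#>' in s  (shared primitive tests, used by both ports and by Pre_)
def pvHasOpen (s : String) : Bool := PySem.Str.isIn "<#" s
def pvHasClose (s : String) : Bool := PySem.Str.isIn "#>" s

-- ===== PORT A =====
-- inner 'while "#>" not in splited_content[content_index]' loop; fuel-guarded (none = IndexError / fuel out)
def pvInnerA (xs : List String) : Int → String → Nat → Option (String × Int)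
  | _, _, 0 => none
  | i, token, fuel+1 =>
    match PySem.List.pyGet? xs i with
    | none => none
    | some e =>
      if pvHasClose e then some (token, i + 1)
      else
        match PySem.List.pyGet? xs (i + 1) with
        | none => none
        | some e' => pvInnerA xs (i + 1) (token ++ e') fuel

-- outer 'while content_index < len(splited_content)' loop
def pvOuterA (xs : List String) : Int → List String → Nat → List String
  | _, acc, 0 => acc
  | i, acc, fuel+1 =>
    if i < (xs.length : Int) then
      match PySem.List.pyGet? xs i with
      | none => acc
      | some e =>
        if !pvHasOpen e then pvOuterA xs (i + 1) (acc ++ [e]) fuel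
        else
          match pvInnerA xs i e (xs.length + 1) with
          | none => acc
          | some (token, j) => pvOuterA xs j (acc ++ [token]) fuel
    else acc

def get_token_list (splited_content : List String) : List String :=
  pvOuterA splited_content 0 [] splited_content.length

-- ===== PORT B =====
def pvStepB (st : List String × Option String) (part : String) : List String × Option String :=
  match st.2 with
  | none =>
    if !pvHasOpen part then (st.1 ++ [part], none)
    else if pvHasClose part then (st.1 ++ [part], none)
    else (st.1, some part)
  | some buf =>
    let buf' := buf ++ part
    if pvHasClose part then (st.1 ++ [buf'], none) else (st.1, some buf')

def get_token_list_alt (splited_content : List String) : List String :=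
  (splited_content.foldl pvStepB ([], none)).1

-- ===== PRECONDITION & SPEC =====
-- open/close state machine over the elements: pvMark tracks whether we are inside a token
def pvMark (inside : Bool) (e : String) : Bool :=
  if inside then !pvHasClose e else pvHasOpen e && !pvHasClose e

-- Pre_ excludes exactly the inputs on which A raises IndexError: a '<#' element (met outside a
-- token) that no later element closes with '#>', i.e. the scan ends still inside a token.
def Pre_get_token_list (splited_content : List String) : Prop :=
  splited_content.foldl pvMark false = false
instance (splited_content : List String) : Decidable (Pre_get_token_list splited_content) := by
  unfold Pre_get_token_list; infer_instance

def pvWitness_get_token_list : List String := ["a", "<#x", "y#>", "b<##>c"]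

def Spec_get_token_list (splited_content : List String) (out : List String) : Prop := out = get_token_list_alt splited_content
instance (splited_content : List String) (out : List String) : Decidable (Spec_get_token_list splited_content out) := by unfold Spec_get_token_list; infer_instance

-- ===== CLAIM (what is proved, stated in full; the proofs are below) =====
def Claim_equal_get_token_list : Prop := ∀ (splited_content : List String), Dom_get_token_list splited_content → Pre_get_token_list splited_content → Spec_get_token_list splited_content (get_token_list splited_content)

-- ===== LEMMAS AND PROOFS =====

-- A's inner loop as a pure list function, aligned with B's inside-a-token steps:
-- consume an element into the buffer, stop after the first element containing '#>'.
def pvMergeClose : String → List String → Option (String × List String)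
  | _, [] => none
  | buf, e :: rest =>
    if pvHasClose e then some (buf ++ e, rest) else pvMergeClose (buf ++ e) rest

theorem pvInnerA_close (xs : List String) (n : Nat) (cur : String) (rest : List String)
    (buf : String) (f : Nat) (h : xs.drop n = cur :: rest) (hc : pvHasClose cur = true)
    (hf : 1 ≤ f) :
    pvInnerA xs (n : Int) buf f = some (buf, (n : Int) + 1) := by
  obtain ⟨f', rfl⟩ : ∃ f', f = f' + 1 := ⟨f - 1, by omega⟩
  have hg : xs[n]? = some cur := by rw [← List.head?_drop, h]; rfl
  simp [pvInnerA, PySem.List.pyGet?_natCast, hg, hc]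

theorem pvInnerA_run (xs : List String) : ∀ (rest : List String) (n : Nat) (cur buf : String)
    (f : Nat), xs.drop n = cur :: rest → pvHasClose cur = false → rest.length + 1 ≤ f →
    pvInnerA xs (n : Int) buf f
      = (pvMergeClose buf rest).map (fun p => (p.1, ((xs.length - p.2.length : Nat) : Int))) := by
  intro rest
  induction rest with
  | nil =>
    intro n cur buf f h hc hf
    obtain ⟨f', rfl⟩ : ∃ f', f = f' + 1 := ⟨f - 1, by omega⟩
    have hg : xs[n]? = some cur := by rw [← List.head?_drop, h]; rfl
    have hg1 : PySem.List.pyGet? xs ((n : Int) + 1) = none := by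
      rw [show ((n : Int) + 1) = ((n + 1 : Nat) : Int) by push_cast; ring,
        PySem.List.pyGet?_natCast, ← List.head?_drop, ← List.drop_drop, h]; rfl
    simp [pvInnerA, PySem.List.pyGet?_natCast, hg, hc, hg1, pvMergeClose]
  | cons e' rest2 ih =>
    intro n cur buf f h hc hf
    obtain ⟨f', rfl⟩ : ∃ f', f = f' + 1 := ⟨f - 1, by omega⟩
    have hg : xs[n]? = some cur := by rw [← List.head?_drop, h]; rfl
    have hd1 : xs.drop (n + 1) = e' :: rest2 := by rw [← List.drop_drop, h]; rfl
    have hg1 : PySem.List.pyGet? xs ((n : Int) + 1) = some e' := by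
      rw [show ((n : Int) + 1) = ((n + 1 : Nat) : Int) by push_cast; ring,
        PySem.List.pyGet?_natCast, ← List.head?_drop, hd1]; rfl
    have hlen : xs.length - n = rest2.length + 2 := by
      have := congrArg List.length h
      simp [List.length_drop] at this
      omega
    by_cases hce : pvHasClose e' = true
    · have hcl := pvInnerA_close xs (n + 1) e' rest2 (buf ++ e') f' hd1 hce
        (by simp only [List.length_cons] at hf; omega)
      rw [show ((n + 1 : Nat) : Int) = (n : Int) + 1 by push_cast; ring] at hcl
      have hidx : ((xs.length - rest2.length : Nat) : Int) = (n : Int) + 1 + 1 := by omega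
      simp [pvInnerA, PySem.List.pyGet?_natCast, hg, hc, hg1, hcl, pvMergeClose, hce, hidx]
    · rw [Bool.not_eq_true] at hce
      have hrun := ih (n + 1) e' (buf ++ e') f' hd1 hce
        (by simp only [List.length_cons] at hf; omega)
      rw [show ((n + 1 : Nat) : Int) = (n : Int) + 1 by push_cast; ring] at hrun
      simp [pvInnerA, PySem.List.pyGet?_natCast, hg, hc, hg1, hrun, pvMergeClose, hce]

theorem pvFoldB_inside : ∀ (rest : List String) (buf tok : String) (rest2 acc : List String),
    pvMergeClose buf rest = some (tok, rest2) →
    rest.foldl pvStepB (acc, some buf) = rest2.foldl pvStepB (acc ++ [tok], none) := by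
  intro rest
  induction rest with
  | nil => intro buf tok rest2 acc h; simp [pvMergeClose] at h
  | cons e rest' ih =>
    intro buf tok rest2 acc h
    by_cases hce : pvHasClose e = true
    · simp [pvMergeClose, hce] at h
      obtain ⟨h1, h2⟩ := h
      simp [List.foldl_cons, pvStepB, hce, h1, h2]
    · rw [Bool.not_eq_true] at hce
      simp [pvMergeClose, hce] at h
      have := ih (buf ++ e) tok rest2 acc h
      simp [List.foldl_cons, pvStepB, hce, this]

theorem pvMergeClose_of_mark : ∀ (rest : List String) (buf : String),
    rest.foldl pvMark true = false →
    ∃ tok rest2, pvMergeClose buf rest = some (tok, rest2) ∧ rest2.foldl pvMark false = false := by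
  intro rest
  induction rest with
  | nil => intro buf h; simp [List.foldl_nil] at h
  | cons e rest' ih =>
    intro buf h
    by_cases hce : pvHasClose e = true
    · refine ⟨buf ++ e, rest', by simp [pvMergeClose, hce], ?_⟩
      simpa [List.foldl_cons, pvMark, hce] using h
    · rw [Bool.not_eq_true] at hce
      have h' : rest'.foldl pvMark true = false := by
        simpa [List.foldl_cons, pvMark, hce] using h
      obtain ⟨tok, rest2, h1, h2⟩ := ih (buf ++ e) h'
      exact ⟨tok, rest2, by simp [pvMergeClose, hce, h1], h2⟩

theorem pvMergeClose_suffix : ∀ (rest : List String) (buf tok : String) (rest2 : List String),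
    pvMergeClose buf rest = some (tok, rest2) →
    ∃ k, 1 ≤ k ∧ k ≤ rest.length ∧ rest.drop k = rest2 := by
  intro rest
  induction rest with
  | nil => intro buf tok rest2 h; simp [pvMergeClose] at h
  | cons e rest' ih =>
    intro buf tok rest2 h
    by_cases hce : pvHasClose e = true
    · simp [pvMergeClose, hce] at h
      exact ⟨1, by omega, by simp, by simpa using h.2⟩
    · rw [Bool.not_eq_true] at hce
      simp [pvMergeClose, hce] at h
      obtain ⟨k, hk1, hk2, hk3⟩ := ih (buf ++ e) tok rest2 h
      exact ⟨k + 1, by omega, by simp; omega, by simpa using hk3⟩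

theorem pvMain_sim (xs : List String) : ∀ (bound : Nat) (rest : List String) (n : Nat)
    (acc : List String) (fuel : Nat),
    rest.length ≤ bound → xs.drop n = rest → rest.length ≤ fuel →
    rest.foldl pvMark false = false →
    pvOuterA xs (n : Int) acc fuel = (rest.foldl pvStepB (acc, none)).1 := by
  intro bound
  induction bound with
  | zero =>
    intro rest n acc fuel hb hd hf hm
    have hrest : rest = [] := List.eq_nil_of_length_eq_zero (by omega)
    subst hrest
    have hn : xs.length ≤ n := List.drop_eq_nil_iff.mp hd
    cases fuel with
    | zero => simp [pvOuterA]
    | succ f =>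
      have hlt : ¬ ((n : Int) < (xs.length : Int)) := by exact_mod_cast not_lt.mpr hn
      simp [pvOuterA, hlt]
  | succ b ih =>
    intro rest n acc fuel hb hd hf hm
    cases rest with
    | nil =>
      have hn : xs.length ≤ n := List.drop_eq_nil_iff.mp hd
      cases fuel with
      | zero => simp [pvOuterA]
      | succ f =>
        have hlt : ¬ ((n : Int) < (xs.length : Int)) := by exact_mod_cast not_lt.mpr hn
        simp [pvOuterA, hlt]
    | cons e rest' =>
      obtain ⟨f, rfl⟩ : ∃ f, fuel = f + 1 := ⟨fuel - 1, by
        simp only [List.length_cons] at hf; omega⟩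
      have hn : n < xs.length := by
        by_contra hc
        rw [List.drop_eq_nil_iff.mpr (by omega)] at hd
        exact List.cons_ne_nil e rest' hd.symm
      have hni : (n : Int) < (xs.length : Int) := by exact_mod_cast hn
      have hg : xs[n]? = some e := by rw [← List.head?_drop, hd]; rfl
      have hd1 : xs.drop (n + 1) = rest' := by rw [← List.drop_drop, hd]; rfl
      have hlen : xs.length - n = rest'.length + 1 := by
        have := congrArg List.length hd
        simp [List.length_drop] at this
        omega
      by_cases ho : pvHasOpen e = true
      · by_cases hce : pvHasClose e = true
        · -- the element both opens and closes: A's inner loop exits at once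
          have hin := pvInnerA_close xs n e rest' e (xs.length + 1) hd hce (by omega)
          have hmk : pvMark false e = false := by simp [pvMark, hce]
          have hm' : rest'.foldl pvMark false = false := by
            simpa [List.foldl_cons, hmk] using hm
          have hrec := ih rest' (n + 1) (acc ++ [e]) f
            (by simp only [List.length_cons] at hb; omega) hd1
            (by simp only [List.length_cons] at hf; omega) hm'
          rw [show ((n + 1 : Nat) : Int) = (n : Int) + 1 by push_cast; ring] at hrec
          simp [pvOuterA, hni, hg, ho, hin, hrec, List.foldl_cons, pvStepB, hce]
        · rw [Bool.not_eq_true] at hce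
          have hmk : pvMark false e = true := by simp [pvMark, ho, hce]
          have hm' : rest'.foldl pvMark true = false := by
            simpa [List.foldl_cons, hmk] using hm
          obtain ⟨tok, rest2, hmc, hm2⟩ := pvMergeClose_of_mark rest' e hm'
          have hin := pvInnerA_run xs rest' n e e (xs.length + 1) hd hce (by omega)
          rw [hmc] at hin
          obtain ⟨k, hk1, hk2, hk3⟩ := pvMergeClose_suffix rest' e tok rest2 hmc
          have hd2 : xs.drop (xs.length - rest2.length) = rest2 := by
            rw [show xs.length - rest2.length = n + 1 + k by
                have : rest2.length = rest'.length - k := by rw [← hk3]; simp [List.length_drop]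
                omega,
              ← List.drop_drop, hd1, hk3]
          have hrec := ih rest2 (xs.length - rest2.length) (acc ++ [tok]) f
            (by
              have : rest2.length = rest'.length - k := by rw [← hk3]; simp [List.length_drop]
              simp only [List.length_cons] at hb; omega)
            hd2
            (by
              have : rest2.length = rest'.length - k := by rw [← hk3]; simp [List.length_drop]
              simp only [List.length_cons] at hf; omega)
            hm2
          have hfold := pvFoldB_inside rest' e tok rest2 acc hmc
          simp [pvOuterA, hni, hg, ho, hin, hrec, List.foldl_cons, pvStepB, hce, hfold]
      · rw [Bool.not_eq_true] at ho
        have hmk : pvMark false e = false := by simp [pvMark, ho]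
        have hm' : rest'.foldl pvMark false = false := by
          simpa [List.foldl_cons, hmk] using hm
        have hrec := ih rest' (n + 1) (acc ++ [e]) f
          (by simp only [List.length_cons] at hb; omega) hd1
          (by simp only [List.length_cons] at hf; omega) hm'
        rw [show ((n + 1 : Nat) : Int) = (n : Int) + 1 by push_cast; ring] at hrec
        simp [pvOuterA, hni, hg, ho, hrec, List.foldl_cons, pvStepB]

-- ===== VERDICT (by name: the statement is the Claim_ definition above) =====
theorem get_token_list_spec : Claim_equal_get_token_list := by
  intro xs _ hpre
  unfold Spec_get_token_list get_token_list get_token_list_alt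
  rw [show (0 : Int) = ((0 : Nat) : Int) from rfl]
  exact pvMain_sim xs xs.length xs 0 [] xs.length le_rfl (by simp) le_rfl hpre
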